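-- pv_equiv track=rewrite | github.com/TerraDharitri/bash64-python | interpeter.py | count_equal_substrings
-- ===== SOURCE A (Python) =====
-- from collections import Counter
--
-- def count_equal_substrings(input_str):
--     count = 0
--     length = len(input_str)
--     for i in range(length):
--         for j in range(i + 1, length + 1):
--             substring = input_str[i:j]
--             mid = len(substring) // 2
--             first_half = substring[:mid]
--             second_half = substring[mid:]
--             if Counter(first_half) == Counter(second_half):
--                 count += 1
--     return count
-- ===== SOURCE B (Python) =====
-- def count_equal_substrings(input_str):
--     # Count substrings whose two halves are anagrams by expanding around each
--     # split center with an incremental char-difference counter: O(n^2).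
--     n = len(input_str)
--     total = 0
--     for c in range(1, n):
--         diff = {}
--         nonzero = 0
--         for h in range(1, min(c, n - c) + 1):
--             for ch, delta in ((input_str[c - h], 1), (input_str[c + h - 1], -1)):
--                 old = diff.get(ch, 0)
--                 new = old + delta
--                 diff[ch] = new
--                 if old == 0:
--                     nonzero += 1
--                 elif new == 0:
--                     nonzero -= 1
--             if nonzero == 0:
--                 total += 1
--     return total
-- ===== Notes on version B (the rewrite author's own statement) =====
-- stated objective: faster
-- what changed: Instead of enumerating all O(n^2) substrings and building two Counters per substring, B expands around each of the n-1 split centers, maintaining one incremental char-difference dict with a running count of its nonzero entries, so each candidate substring costs O(1) (odd-length substrings, whose halves can never be anagrams, are skipped entirely).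
import Mathlib
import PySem

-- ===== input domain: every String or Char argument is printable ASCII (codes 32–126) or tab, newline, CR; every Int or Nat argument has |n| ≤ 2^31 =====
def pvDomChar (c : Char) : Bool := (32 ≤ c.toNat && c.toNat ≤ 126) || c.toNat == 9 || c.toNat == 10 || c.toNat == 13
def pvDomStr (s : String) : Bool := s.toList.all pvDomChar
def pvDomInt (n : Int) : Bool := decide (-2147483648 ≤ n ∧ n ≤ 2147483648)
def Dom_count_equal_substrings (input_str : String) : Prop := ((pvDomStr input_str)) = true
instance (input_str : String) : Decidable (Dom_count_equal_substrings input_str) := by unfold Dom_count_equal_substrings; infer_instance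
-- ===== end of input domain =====

-- B replaces A's scan of all O(n^2) substrings (two fresh Counters per substring) by an
-- expansion around each split center maintaining one incremental char-difference dict
-- with a running count of its nonzero entries (odd-length substrings are skipped).

-- ===== PORT A =====
-- Python dict equality (d == d'): order-insensitive — same key set, same value at each key.
def pyDictEq (d d' : PySem.Dict Char Int) : Bool :=
  d.keys.all (fun k => d'.contains k) && d'.keys.all (fun k => d.contains k) &&
    d.keys.all (fun k => d.get? k == d'.get? k)

def count_equal_substrings (input_str : String) : Int :=
  let s := input_str.toList
  let length : Int := (s.length : Int)
  (PySem.List.pyRange 0 length 1).foldl (fun count i =>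
    (PySem.List.pyRange (i + 1) (length + 1) 1).foldl (fun count j =>
      let substring := PySem.List.slice s (some i) (some j)
      let mid := PySem.Int.floordiv (substring.length : Int) 2
      let first_half := PySem.List.slice substring none (some mid)
      let second_half := PySem.List.slice substring (some mid) none
      if pyDictEq (PySem.Dict.counter first_half) (PySem.Dict.counter second_half) then
        count + 1
      else count) count) 0

-- ===== PORT B =====
-- one update 'diff[ch] = diff.get(ch, 0) + delta' with the nonzero-entry counter maintained
def bUpd (st : PySem.Dict Char Int × Int) (ch : Char) (delta : Int) :
    PySem.Dict Char Int × Int :=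
  let old := st.1.getD ch 0
  let new := old + delta
  (st.1.insert ch new,
    if old = 0 then st.2 + 1 else if new = 0 then st.2 - 1 else st.2)

-- body of B's inner loop over the half-width h (state: ((diff, nonzero), total))
def bInner (s : List Char) (c : Int) (st : (PySem.Dict Char Int × Int) × Int) (h : Int) :
    (PySem.Dict Char Int × Int) × Int :=
  let st1 := bUpd st.1 (PySem.List.pyGetD s (c - h) ' ') 1
  let st2 := bUpd st1 (PySem.List.pyGetD s (c + h - 1) ' ') (-1)
  (st2, if st2.2 = 0 then st.2 + 1 else st.2)

def count_equal_substrings_alt (input_str : String) : Int :=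
  let s := input_str.toList
  let n : Int := (s.length : Int)
  (PySem.List.pyRange 1 n 1).foldl (fun total c =>
    ((PySem.List.pyRange 1 (min c (n - c) + 1) 1).foldl (bInner s c)
      ((PySem.Dict.empty, 0), total)).2) 0

-- ===== PRECONDITION & SPEC =====
def Spec_count_equal_substrings (input_str : String) (out : Int) : Prop := out = count_equal_substrings_alt input_str
instance (input_str : String) (out : Int) : Decidable (Spec_count_equal_substrings input_str out) := by unfold Spec_count_equal_substrings; infer_instance

-- ===== CLAIM (what is proved, stated in full; the proofs are below) =====
def Claim_equal_count_equal_substrings : Prop := ∀ (input_str : String), Dom_count_equal_substrings input_str → Spec_count_equal_substrings input_str (count_equal_substrings input_str)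

-- ===== LEMMAS AND PROOFS =====

-- A's per-substring condition, exactly as written in port A
def condA (s : List Char) (i j : Int) : Bool :=
  let substring := PySem.List.slice s (some i) (some j)
  let mid := PySem.Int.floordiv (substring.length : Int) 2
  let first_half := PySem.List.slice substring none (some mid)
  let second_half := PySem.List.slice substring (some mid) none
  pyDictEq (PySem.Dict.counter first_half) (PySem.Dict.counter second_half)

-- 'the two width-h halves around center c are anagrams'
def QbB (s : List Char) (c h : Nat) : Bool :=
  ((s.drop (c - h)).take h).isPerm ((s.drop c).take h)

-- number of nonzero entries of the difference dict
def nzF (d : PySem.Dict Char Int) : Int :=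
  ((d.keys.filter (fun a => !(d.getD a 0 == 0))).length : Int)

lemma get?_counter (xs : List Char) (v : Char) :
    (PySem.Dict.counter xs).get? v = if v ∈ xs then some ((xs.count v : Int)) else none := by
  by_cases hv : v ∈ xs
  · rw [if_pos hv]
    apply PySem.Dict.get?_of_mem_items _ _ (PySem.Dict.nodup_keys_counter xs)
    rw [PySem.Dict.items_counter]
    exact List.mem_map.2 ⟨v, (PySem.Set.mem_ofList xs v).2 hv, rfl⟩
  · rw [if_neg hv, PySem.Dict.get?_eq_none_iff_contains, PySem.Dict.contains_counter]
    simpa using hv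

lemma pyDictEq_counter (a b : List Char) :
    (pyDictEq (PySem.Dict.counter a) (PySem.Dict.counter b) = true) ↔
      ∀ x, a.count x = b.count x := by
  rw [pyDictEq]
  simp only [Bool.and_eq_true, List.all_eq_true, PySem.Dict.keys_counter,
    PySem.Dict.contains_counter, PySem.Set.mem_ofList, beq_iff_eq, List.contains_eq_mem,
    decide_eq_true_eq]
  constructor
  · rintro ⟨⟨h1, h2⟩, h3⟩ x
    by_cases hx : x ∈ a
    · have := h3 x hx
      rw [get?_counter, get?_counter, if_pos hx, if_pos (h1 x hx)] at this
      exact_mod_cast Option.some_injective _ this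
    · have hxb : x ∉ b := fun hb => hx (h2 x hb)
      rw [List.count_eq_zero_of_not_mem hx, List.count_eq_zero_of_not_mem hxb]
  · intro h
    have hmem : ∀ x, x ∈ a ↔ x ∈ b := by
      intro x
      rw [← List.count_pos_iff, ← List.count_pos_iff, h x]
    refine ⟨⟨fun x hx => (hmem x).1 hx, fun x hx => (hmem x).2 hx⟩, ?_⟩
    intro x hx
    rw [get?_counter, get?_counter, if_pos hx, if_pos ((hmem x).1 hx), h x]

lemma QbB_iff (s : List Char) (c h : Nat) :
    QbB s c h = true ↔ ∀ a, ((s.drop (c - h)).take h).count a = ((s.drop c).take h).count a := by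
  rw [QbB, List.isPerm_iff, List.perm_iff_count]

lemma condA_nat (s : List Char) (i j : Nat) (hj : j ≤ s.length) :
    condA s (i : Int) (j : Int) =
      pyDictEq (PySem.Dict.counter (((s.drop i).take (j - i)).take ((j - i) / 2)))
               (PySem.Dict.counter (((s.drop i).take (j - i)).drop ((j - i) / 2))) := by
  rw [condA]
  simp only [PySem.List.slice_natCast]
  have hlen : ((s.drop i).take (j - i)).length = j - i := by
    simp [List.length_take, List.length_drop]
    omega
  rw [hlen]
  have hfd : PySem.Int.floordiv ((j - i : Nat) : Int) 2 = (((j - i) / 2 : Nat) : Int) :=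
    PySem.Int.floordiv_natCast (j - i) 2
  rw [hfd, PySem.List.slice_to _ (by positivity), PySem.List.slice_from _ (by positivity)]
  have ht : ((((j - i) / 2 : Nat) : Int)).toNat = (j - i) / 2 := by omega
  rw [ht]

lemma condA_iff_perm (s : List Char) (i j : Nat) (hj : j ≤ s.length) :
    (condA s (i : Int) (j : Int) = true) ↔
      (((s.drop i).take (j - i)).take ((j - i) / 2)).Perm
        (((s.drop i).take (j - i)).drop ((j - i) / 2)) := by
  rw [condA_nat s i j hj, pyDictEq_counter, List.perm_iff_count]

lemma condA_odd (s : List Char) (i j : Nat) (hij : i < j) (hj : j ≤ s.length)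
    (hodd : (j - i) % 2 = 1) : condA s (i : Int) (j : Int) = false := by
  rw [Bool.eq_false_iff]
  intro hc
  have hp := (condA_iff_perm s i j hj).1 hc
  have hlen := hp.length_eq
  have h1 : (((s.drop i).take (j - i)).take ((j - i) / 2)).length = (j - i) / 2 := by
    simp [List.length_take, List.length_drop]; omega
  have h2 : (((s.drop i).take (j - i)).drop ((j - i) / 2)).length = (j - i) - (j - i) / 2 := by
    simp [List.length_take, List.length_drop]; omega
  rw [h1, h2] at hlen
  omega

lemma condA_even (s : List Char) (i h : Nat) (hh : 1 ≤ h) (hn : i + 2 * h ≤ s.length) :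
    (condA s (i : Int) ((i + 2 * h : Nat) : Int) = true) ↔ QbB s (i + h) h = true := by
  rw [condA_iff_perm s i (i + 2 * h) hn, QbB, List.isPerm_iff]
  have e0 : i + 2 * h - i = 2 * h := by omega
  have e1 : (((s.drop i).take (2 * h)).take h) = (s.drop (i + h - h)).take h := by
    rw [List.take_take]
    congr 1
    · omega
    · congr 1; omega
  have e2 : (((s.drop i).take (2 * h)).drop h) = (s.drop (i + h)).take h := by
    rw [List.drop_take, List.drop_drop]
    have h1 : 2 * h - h = h := by omega
    have h2 : h + i = i + h := by omega
    simp only [h1]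
  have e3 : 2 * h / 2 = h := by omega
  rw [e0, e3, e1, e2]

lemma filter_switch_one {α : Type} [DecidableEq α] (l : List α) (hl : l.Nodup) (k : α)
    (hk : k ∈ l) (p q : α → Bool) (hpq : ∀ x ∈ l, x ≠ k → p x = q x) :
    ((l.filter q).length : Int) =
      (l.filter p).length + (if q k then 1 else 0) - (if p k then 1 else 0) := by
  induction l with
  | nil => simp at hk
  | cons x xs ih =>
    rcases List.nodup_cons.1 hl with ⟨hx, hxs⟩
    by_cases hxk : x = k
    · subst hxk
      have hagree : xs.filter p = xs.filter q := by
        apply List.filter_congr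
        intro y hy
        exact hpq y (List.mem_cons_of_mem _ hy) (fun e => hx (e ▸ hy))
      simp only [List.filter_cons, hagree]
      by_cases h1 : q x <;> by_cases h2 : p x <;> simp [h1, h2]
    · have hk' : k ∈ xs := by
        rcases List.mem_cons.1 hk with h | h
        · exact absurd h.symm hxk
        · exact h
      have hih := ih hxs hk' (fun y hy hyk => hpq y (List.mem_cons_of_mem _ hy) hyk)
      have hpx : p x = q x := hpq x List.mem_cons_self hxk
      simp only [List.filter_cons, ← hpx]
      by_cases h1 : p x <;> simp [h1] <;> push_cast at hih ⊢ <;> omega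

lemma nzF_insert (d : PySem.Dict Char Int) (hnd : d.keys.Nodup) (ch : Char) (v : Int) :
    nzF (d.insert ch v) =
      nzF d + (if v = 0 then 0 else 1) - (if d.getD ch 0 = 0 then 0 else 1) := by
  by_cases hc : d.contains ch = true
  · have hk : (d.insert ch v).keys = d.keys := PySem.Dict.keys_insert_of_contains d v hc
    have hmem : ch ∈ d.keys := (PySem.Dict.contains_iff_mem_keys d ch).1 hc
    rw [nzF, nzF, hk]
    have heq := filter_switch_one d.keys hnd ch hmem
      (fun a => !(d.getD a 0 == 0)) (fun a => !((d.insert ch v).getD a 0 == 0))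
      (by
        intro x hx hxk
        simp [PySem.Dict.getD_insert, hxk])
    rw [heq]
    have h1 : (if (fun a => !((d.insert ch v).getD a 0 == 0)) ch = true then (1 : Int) else 0)
        = if v = 0 then 0 else 1 := by
      by_cases hv : v = 0 <;> simp [hv]
    have h2 : (if (fun a => !(d.getD a 0 == 0)) ch = true then (1 : Int) else 0)
        = if d.getD ch 0 = 0 then 0 else 1 := by
      by_cases hv : d.getD ch 0 = 0 <;> simp [hv]
    rw [h1, h2]
  · have hc' : d.contains ch = false := by simpa using hc
    have hk : (d.insert ch v).keys = d.keys ++ [ch] :=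
      PySem.Dict.keys_insert_of_not_contains d v hc'
    have hmem : ch ∉ d.keys := fun hm => by
      rw [(PySem.Dict.contains_iff_mem_keys d ch).2 hm] at hc'; cases hc'
    rw [nzF, nzF, hk, List.filter_append]
    have hagree : d.keys.filter (fun a => !((d.insert ch v).getD a 0 == 0))
        = d.keys.filter (fun a => !(d.getD a 0 == 0)) := by
      apply List.filter_congr
      intro x hx
      have hxch : x ≠ ch := fun e => hmem (e ▸ hx)
      simp [PySem.Dict.getD_insert, hxch]
    rw [hagree, PySem.Dict.getD_of_not_contains d 0 hc']
    by_cases hv : v = 0 <;> simp [PySem.Dict.getD_insert, hv]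

lemma nzF_eq_zero_iff (d : PySem.Dict Char Int) : nzF d = 0 ↔ ∀ a, d.getD a 0 = 0 := by
  rw [nzF]
  constructor
  · intro h a
    have hlen : (d.keys.filter (fun a => !(d.getD a 0 == 0))).length = 0 := by exact_mod_cast h
    rw [List.length_eq_zero_iff, List.filter_eq_nil_iff] at hlen
    by_cases ha : a ∈ d.keys
    · have := hlen a ha
      simpa using this
    · exact PySem.Dict.getD_of_not_contains d 0 (by
        rw [← Bool.not_eq_true, PySem.Dict.contains_iff_mem_keys]; exact ha)
  · intro h
    have : d.keys.filter (fun a => !(d.getD a 0 == 0)) = [] := by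
      rw [List.filter_eq_nil_iff]
      intro a _
      simp [h a]
    rw [this]
    simp

lemma bUpd_spec (d : PySem.Dict Char Int) (ch : Char) (delta : Int)
    (hδ : delta = 1 ∨ delta = -1) (hnd : d.keys.Nodup) :
    bUpd (d, nzF d) ch delta =
      (d.insert ch (d.getD ch 0 + delta), nzF (d.insert ch (d.getD ch 0 + delta))) := by
  rw [bUpd]
  simp only
  rw [nzF_insert d hnd ch (d.getD ch 0 + delta)]
  congr 1
  split_ifs <;> omega

lemma innerB_spec (s : List Char) (c : Nat) (m : Nat) (hm : m ≤ min c (s.length - c))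
    (hcn : c < s.length) (t : Int) :
    ∃ d : PySem.Dict Char Int,
      ((List.range m).map (fun k : Nat => ((1 : Int) + (k : Int)))).foldl (bInner s (c : Int))
          ((PySem.Dict.empty, 0), t)
        = ((d, nzF d), t + (List.countP (fun k => QbB s c (1 + k)) (List.range m) : Int))
      ∧ d.keys.Nodup
      ∧ ∀ a : Char, d.getD a 0 =
          (((s.drop (c - m)).take m).count a : Int) - ((s.drop c).take m).count a := by
  induction m with
  | zero =>
    refine ⟨PySem.Dict.empty, ?_, ?_, ?_⟩
    · simp [nzF, PySem.Dict.keys_empty]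
    · simp [PySem.Dict.keys_empty]
    · intro a; simp [PySem.Dict.getD_empty]
  | succ m ih =>
    obtain ⟨d, hfold, hnd, hgetD⟩ := ih (by omega)
    -- the two characters looked at in step h = m + 1
    have hxlt : c - (m + 1) < s.length := by omega
    have hylt : c + m < s.length := by omega
    set x := s[c - (m + 1)]'hxlt with hxdef
    set y := s[c + m]'hylt with hydef
    -- index arithmetic for the two pyGetD calls
    have hix : (c : Int) - (1 + (m : Int)) = ((c - (m + 1) : Nat) : Int) := by omega
    have hiy : (c : Int) + (1 + (m : Int)) - 1 = ((c + m : Nat) : Int) := by omega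
    have hgx : PySem.List.pyGetD s ((c : Int) - (1 + (m : Int))) ' ' = x := by
      rw [hix, PySem.List.pyGetD_natCast, List.getD_eq_getElem s ' ' hxlt]
    have hgy : PySem.List.pyGetD s ((c : Int) + (1 + (m : Int)) - 1) ' ' = y := by
      rw [hiy, PySem.List.pyGetD_natCast, List.getD_eq_getElem s ' ' hylt]
    -- unroll the fold by one step
    rw [List.range_succ, List.map_append, List.foldl_append, hfold]
    set d1 := d.insert x (d.getD x 0 + 1) with hd1
    set d2 := d1.insert y (d1.getD y 0 + (-1)) with hd2
    have hnd1 : d1.keys.Nodup := PySem.Dict.nodup_keys_insert d x _ hnd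
    have hnd2 : d2.keys.Nodup := PySem.Dict.nodup_keys_insert d1 y _ hnd1
    have hstep : bInner s (c : Int)
        ((d, nzF d), t + (List.countP (fun k => QbB s c (1 + k)) (List.range m) : Int))
        ((1 : Int) + (m : Int))
        = ((d2, nzF d2),
            if nzF d2 = 0 then
              t + (List.countP (fun k => QbB s c (1 + k)) (List.range m) : Int) + 1
            else t + (List.countP (fun k => QbB s c (1 + k)) (List.range m) : Int)) := by
      rw [bInner]
      simp only [hgx, hgy]
      rw [bUpd_spec d x 1 (Or.inl rfl) hnd, bUpd_spec d1 y (-1) (Or.inr rfl) hnd1]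
    -- slice decompositions
    have hLs : (s.drop (c - (m + 1))).take (m + 1) = x :: (s.drop (c - m)).take m := by
      rw [List.drop_eq_getElem_cons hxlt]
      have : c - (m + 1) + 1 = c - m := by omega
      rw [this, List.take_succ_cons]
    have hRs : (s.drop c).take (m + 1) = (s.drop c).take m ++ [y] := by
      rw [List.take_add_one, List.getElem?_drop, List.getElem?_eq_getElem hylt]
      rfl
    -- new getD values
    have hgetD2 : ∀ a : Char, d2.getD a 0 =
        (((s.drop (c - (m + 1))).take (m + 1)).count a : Int)
          - ((s.drop c).take (m + 1)).count a := by
      intro a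
      have hda := hgetD a
      have hcL : (((s.drop (c - (m + 1))).take (m + 1)).count a : Int)
          = ((s.drop (c - m)).take m).count a + (if a = x then 1 else 0) := by
        by_cases h : a = x <;> simp [hLs, h, eq_comm]
      have hcR : (((s.drop c).take (m + 1)).count a : Int)
          = ((s.drop c).take m).count a + (if a = y then 1 else 0) := by
        by_cases h : a = y <;> simp [hRs, List.count_append, h, eq_comm]
      have hv1 : d1.getD a 0 = d.getD a 0 + (if a = x then 1 else 0) := by
        rw [hd1, PySem.Dict.getD_insert]
        split_ifs with h
        · rw [h]
        · ring
      have hv2 : d2.getD a 0 = d1.getD a 0 + (if a = y then -1 else 0) := by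
        rw [hd2, PySem.Dict.getD_insert]
        split_ifs with h
        · rw [h]
        · ring
      rw [hv2, hv1, hda, hcL, hcR]
      split_ifs <;> omega
    refine ⟨d2, ?_, hnd2, hgetD2⟩
    simp only [List.map_cons, List.map_nil, List.foldl_cons, List.foldl_nil]
    rw [hstep]
    have hiff : nzF d2 = 0 ↔ QbB s c (1 + m) = true := by
      rw [nzF_eq_zero_iff, QbB_iff]
      constructor
      · intro hz a
        have := hgetD2 a
        rw [hz a] at this
        have h1m : 1 + m = m + 1 := by omega
        rw [h1m]
        omega
      · intro hq a
        rw [hgetD2 a]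
        have := hq a
        have h1m : m + 1 = 1 + m := by omega
        rw [h1m]
        omega
    have hcnt : (List.countP (fun k => QbB s c (1 + k)) (List.range m ++ [m]) : Int)
        = (List.countP (fun k => QbB s c (1 + k)) (List.range m) : Int)
          + (if QbB s c (1 + m) = true then 1 else 0) := by
      rw [List.countP_append]
      by_cases h : QbB s c (1 + m) = true <;> simp [h]
    rw [hcnt]
    by_cases hz : nzF d2 = 0
    · rw [if_pos hz, if_pos (hiff.1 hz)]
      simp only [Prod.mk.injEq, true_and]
      ring
    · rw [if_neg hz, if_neg (fun hq => hz (hiff.2 hq))]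
      simp only [Prod.mk.injEq, true_and]
      ring

lemma sum_map_range_int (f : Nat → Int) (n : Nat) :
    ((List.range n).map f).sum = ∑ i ∈ Finset.range n, f i := by
  induction n with
  | zero => simp
  | succ n ih =>
    rw [List.range_succ, Finset.sum_range_succ, List.map_append, List.sum_append, ih]; simp

lemma countP_range_card (p : Nat → Bool) (m : Nat) :
    List.countP p (List.range m) = ((Finset.range m).filter (fun k => p k = true)).card := by
  induction m with
  | zero => simp
  | succ m ih =>
    rw [List.range_succ, List.countP_append, Finset.range_add_one, Finset.filter_insert, ih]
    by_cases h : p m = true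
    · rw [if_pos h, Finset.card_insert_of_notMem (by simp)]
      simp [h]
    · rw [if_neg h]
      simp [h]

lemma filter_range_extend (M K : Nat) (hMK : M ≤ K) (q : Nat → Prop) [DecidablePred q] :
    ((Finset.range M).filter q).card = ((Finset.range K).filter (fun k => k < M ∧ q k)).card := by
  congr 1
  ext x
  simp only [Finset.mem_filter, Finset.mem_range]
  constructor
  · rintro ⟨h1, h2⟩; exact ⟨lt_of_lt_of_le h1 hMK, h1, h2⟩
  · rintro ⟨_, h1, h2⟩; exact ⟨h1, h2⟩

lemma sum_card_filter_prod (M K : Nat) (q : Nat → Nat → Prop) [∀ i, DecidablePred (q i)] :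
    ∑ i ∈ Finset.range M, ((Finset.range K).filter (q i)).card
      = (((Finset.range M) ×ˢ (Finset.range K)).filter (fun p => q p.1 p.2)).card := by
  rw [Finset.card_filter, Finset.sum_product]
  simp only [Finset.card_filter]

lemma portA_eq (str : String) :
    count_equal_substrings str =
      ((∑ i ∈ Finset.range str.toList.length,
        ((Finset.range (str.toList.length + 1)).filter
          (fun k => k < str.toList.length - i ∧
            condA str.toList (i : Int) ((i : Int) + 1 + (k : Int)) = true)).card : Nat) : Int) := by
  rw [count_equal_substrings]
  set s := str.toList with hs
  set n := s.length with hn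
  have hinner : ∀ (cnt : Int), ∀ i ∈ PySem.List.pyRange 0 (n : Int) 1,
      (PySem.List.pyRange (i + 1) ((n : Int) + 1) 1).foldl (fun count j =>
        let substring := PySem.List.slice s (some i) (some j)
        let mid := PySem.Int.floordiv (substring.length : Int) 2
        let first_half := PySem.List.slice substring none (some mid)
        let second_half := PySem.List.slice substring (some mid) none
        if pyDictEq (PySem.Dict.counter first_half) (PySem.Dict.counter second_half) then
          count + 1
        else count) cnt
      = cnt + (List.countP (fun j => condA s i j)
          (PySem.List.pyRange (i + 1) ((n : Int) + 1) 1) : Int) := by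
    intro cnt i _
    exact PySem.List.foldl_if_add_one (fun j => condA s i j) _ cnt
  rw [PySem.List.foldl_congr_mem _ _
    (fun count i => count + (List.countP (fun j => condA s i j)
      (PySem.List.pyRange (i + 1) ((n : Int) + 1) 1) : Int)) 0 hinner]
  rw [PySem.List.foldl_add]
  rw [PySem.List.pyRange_one, List.map_map]
  have hn0 : ((n : Int) - 0).toNat = n := by omega
  rw [hn0, sum_map_range_int]
  rw [zero_add, Nat.cast_sum]
  apply Finset.sum_congr rfl
  intro i hi
  simp only [Function.comp_apply, zero_add]
  rw [PySem.List.pyRange_one, List.countP_map]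
  have hni : (((n : Int) + 1) - ((i : Int) + 1)).toNat = n - i := by
    simp only [Finset.mem_range] at hi
    omega
  rw [hni]
  have hcomp : ((fun j => condA s ((i : Nat) : Int) j)
        ∘ (fun k : Nat => ((i : Nat) : Int) + 1 + (k : Nat)))
      = fun k : Nat => condA s (i : Int) ((i : Int) + 1 + (k : Int)) := by
    funext k
    rfl
  rw [hcomp, countP_range_card, filter_range_extend (n - i) (n + 1) (by omega)]

lemma portB_eq (str : String) :
    count_equal_substrings_alt str =
      ((∑ c ∈ Finset.range (str.toList.length - 1),
        ((Finset.range str.toList.length).filter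
          (fun k => k < min (1 + c) (str.toList.length - 1 - c) ∧
            QbB str.toList (1 + c) (1 + k) = true)).card : Nat) : Int) := by
  rw [count_equal_substrings_alt]
  set s := str.toList with hs
  set n := s.length with hn
  have houter : ∀ (total : Int), ∀ c ∈ PySem.List.pyRange 1 (n : Int) 1,
      ((PySem.List.pyRange 1 (min c ((n : Int) - c) + 1) 1).foldl (bInner s c)
        ((PySem.Dict.empty, 0), total)).2
      = total + (List.countP (fun k => QbB s c.toNat (1 + k))
          (List.range (min c.toNat (n - c.toNat))) : Int) := by
    intro total c hc
    rw [PySem.List.mem_pyRange_one] at hc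
    set m : Nat := c.toNat with hm
    have hcm : c = (m : Int) := by omega
    have hmn : m < n := by omega
    have hmin : min c ((n : Int) - c) = ((min m (n - m) : Nat) : Int) := by
      rw [hcm]; omega
    rw [hmin, hcm]
    have hrange : PySem.List.pyRange 1 (((min m (n - m) : Nat) : Int) + 1) 1
        = (List.range (min m (n - m))).map (fun k : Nat => ((1 : Int) + (k : Int))) := by
      rw [PySem.List.pyRange_one]
      have : (((min m (n - m) : Nat) : Int) + 1 - 1).toNat = min m (n - m) := by omega
      rw [this]
    rw [hrange]
    obtain ⟨d, hfold, -, -⟩ := innerB_spec s m (min m (n - m)) le_rfl hmn total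
    rw [hfold]
  rw [PySem.List.foldl_congr_mem _ _
    (fun total c => total + (List.countP (fun k => QbB s c.toNat (1 + k))
      (List.range (min c.toNat (n - c.toNat))) : Int)) 0
    (by intro total c hc; exact houter total c hc)]
  rw [PySem.List.foldl_add, PySem.List.pyRange_one, List.map_map]
  have hn1 : ((n : Int) - 1).toNat = n - 1 := by omega
  rw [hn1, sum_map_range_int, zero_add, Nat.cast_sum]
  apply Finset.sum_congr rfl
  intro c hc
  simp only [Finset.mem_range] at hc
  simp only [Function.comp_apply]
  have ht : ((1 : Int) + (c : Int)).toNat = 1 + c := by omega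
  rw [ht]
  have hsub : n - (1 + c) = n - 1 - c := by omega
  rw [hsub, countP_range_card, filter_range_extend (min (1 + c) (n - 1 - c)) n (by omega)]

lemma cards_eq (s : List Char) :
    (((Finset.range s.length) ×ˢ (Finset.range (s.length + 1))).filter
        (fun p => p.2 < s.length - p.1 ∧
          condA s (p.1 : Int) ((p.1 : Int) + 1 + (p.2 : Int)) = true)).card
    = (((Finset.range (s.length - 1)) ×ˢ (Finset.range s.length)).filter
        (fun p => p.2 < min (1 + p.1) (s.length - 1 - p.1) ∧
          QbB s (1 + p.1) (1 + p.2) = true)).card := by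
  set n := s.length with hn
  -- members of the left set have an odd gap k (odd-length substrings never count)
  have hodd_mem : ∀ i k : Nat, i < n → k < n - i →
      condA s (i : Int) ((i : Int) + 1 + (k : Int)) = true → k % 2 = 1 := by
    intro i k hi hk hcond
    by_contra hpar
    have hcast : ((i : Int) + 1 + (k : Int)) = ((i + 1 + k : Nat) : Int) := by push_cast; ring
    rw [hcast] at hcond
    rw [condA_odd s i (i + 1 + k) (by omega) (by omega) (by omega)] at hcond
    cases hcond
  -- the condition transported through the change of variables
  have hcond_iff : ∀ i k : Nat, i < n → k < n - i → k % 2 = 1 →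
      (condA s (i : Int) ((i : Int) + 1 + (k : Int)) = true ↔
        QbB s (i + (k + 1) / 2) ((k + 1) / 2) = true) := by
    intro i k hi hk hodd
    have h1 : 1 ≤ (k + 1) / 2 := by omega
    have h2 : i + 2 * ((k + 1) / 2) ≤ n := by omega
    have hcast : ((i : Int) + 1 + (k : Int)) = ((i + 2 * ((k + 1) / 2) : Nat) : Int) := by
      push_cast; omega
    rw [hcast]
    exact condA_even s i ((k + 1) / 2) h1 h2
  apply Finset.card_bij'
    (i := fun p _ => (p.1 + (p.2 + 1) / 2 - 1, (p.2 + 1) / 2 - 1))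
    (j := fun p _ => (p.1 - p.2, 2 * p.2 + 1))
  · -- left inverse
    rintro ⟨i, k⟩ hp
    simp only [Finset.mem_filter, Finset.mem_product, Finset.mem_range] at hp
    obtain ⟨⟨hi, hk1⟩, hk2, hcond⟩ := hp
    have hodd := hodd_mem i k hi hk2 hcond
    have e1 : i + (k + 1) / 2 - 1 - ((k + 1) / 2 - 1) = i := by omega
    have e2 : 2 * ((k + 1) / 2 - 1) + 1 = k := by omega
    simp [e1, e2]
  · -- right inverse
    rintro ⟨u, v⟩ hp
    simp only [Finset.mem_filter, Finset.mem_product, Finset.mem_range] at hp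
    obtain ⟨⟨hu, hv⟩, hvmin, hq⟩ := hp
    have e1 : u - v + (2 * v + 1 + 1) / 2 - 1 = u := by omega
    have e2 : (2 * v + 1 + 1) / 2 - 1 = v := by omega
    simp [e1, e2]
  · -- maps into the right set
    rintro ⟨i, k⟩ hp
    simp only [Finset.mem_filter, Finset.mem_product, Finset.mem_range] at hp ⊢
    obtain ⟨⟨hi, hk1⟩, hk2, hcond⟩ := hp
    have hodd := hodd_mem i k hi hk2 hcond
    have hq := (hcond_iff i k hi hk2 hodd).1 hcond
    refine ⟨⟨by omega, by omega⟩, by omega, ?_⟩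
    have e1 : 1 + (i + (k + 1) / 2 - 1) = i + (k + 1) / 2 := by omega
    have e2 : 1 + ((k + 1) / 2 - 1) = (k + 1) / 2 := by omega
    rw [e1, e2]
    exact hq
  · -- maps back into the left set
    rintro ⟨u, v⟩ hp
    simp only [Finset.mem_filter, Finset.mem_product, Finset.mem_range] at hp ⊢
    obtain ⟨⟨hu, hv⟩, hvmin, hq⟩ := hp
    have hvu : v ≤ u := by omega
    refine ⟨⟨by omega, by omega⟩, by omega, ?_⟩
    have hiff := hcond_iff (u - v) (2 * v + 1) (by omega) (by omega) (by omega)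
    apply hiff.2
    have e1 : u - v + (2 * v + 1 + 1) / 2 = 1 + u := by omega
    have e2 : (2 * v + 1 + 1) / 2 = 1 + v := by omega
    rw [e1, e2]
    exact hq

-- ===== VERDICT (by name: the statement is the Claim_ definition above) =====
theorem count_equal_substrings_spec : Claim_equal_count_equal_substrings := by
  intro str _
  show count_equal_substrings str = count_equal_substrings_alt str
  rw [portA_eq, portB_eq, sum_card_filter_prod, sum_card_filter_prod, cards_eq]
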